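-- pv_equiv track=rewrite | github.com/heofthetea/range_to_regex | range_to_regex.py | match_down
-- ===== SOURCE A (Python) =====
-- def match_down(hi: str, prefix="", to_zero=True) -> str:
--     """
--     Constructs an expression to match all numbers between 0{n} and hi (assuming hi has length n).
--     If `to_zero` is set to falses, it will match all numbers between hi and the next lowest power of 10, inclusive.
--     """
--     if not to_zero:
--         if hi[0] == "1":
--             pre = hi[0]
--         else:
--             pre = f"[1-{int(hi[0]) - 1}]" if hi[0] > "2" else "1"
--             pre += "[0-9]" * (len(hi) - 1) + f"|{hi[0]}"
--         return f"{prefix}{pre}({match_down(hi[1:], prefix='', to_zero=True)})"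
--
--     if len(hi) == 1:
--         return f"{prefix}[0-{hi}]" if hi != "0" else prefix + hi
--     if hi[0] == "0":
--         return match_down(hi[1:], prefix=prefix + hi[0])
--     range_k = f"[0-{int(hi[0]) - 1}]" if hi[0] != "1" else "0"
--     range_k += "".join(["[0-9]" for _ in hi[1:]])
--
--     return f"{prefix}{range_k}|{match_down(hi[1:], prefix=prefix + hi[0])}"
-- ===== SOURCE B (Python) =====
-- def match_down(hi: str, prefix="", to_zero=True) -> str:
--     """
--     Iterative re-implementation: a single left-to-right pass over `hi` that
--     maintains a running prefix and collects the alternation terms, joined at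
--     the end; the not-to_zero case builds its 'pre' block and wraps the loop's
--     result for hi[1:] in parentheses.
--     """
--     if not to_zero:
--         first = hi[0]
--         if first == "1":
--             pre = first
--         else:
--             pre = ("[1-" + str(int(first) - 1) + "]") if first > "2" else "1"
--             pre += "[0-9]" * (len(hi) - 1) + "|" + first
--         return prefix + pre + "(" + match_down(hi[1:]) + ")"
--
--     terms = []
--     run = prefix
--     n = len(hi)
--     for i, d in enumerate(hi):
--         rest = n - 1 - i
--         if rest == 0:
--             terms.append(run + d if d == "0" else run + "[0-" + d + "]")
--         elif d != "0":
--             low = "0" if d == "1" else "[0-" + str(int(d) - 1) + "]"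
--             terms.append(run + low + "[0-9]" * rest)
--             run += d
--         else:
--             run += d
--     return "|".join(terms)
-- ===== Notes on version B (the rewrite author's own statement) =====
-- stated objective: alternative
-- what changed: Replaces A's per-digit recursion (each call re-slicing hi and threading prefix through nested f-string returns) by a single explicit left-to-right loop over hi that maintains a running prefix and collects the alternation terms into a list joined once with the alternation separator at the end.
import Mathlib
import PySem

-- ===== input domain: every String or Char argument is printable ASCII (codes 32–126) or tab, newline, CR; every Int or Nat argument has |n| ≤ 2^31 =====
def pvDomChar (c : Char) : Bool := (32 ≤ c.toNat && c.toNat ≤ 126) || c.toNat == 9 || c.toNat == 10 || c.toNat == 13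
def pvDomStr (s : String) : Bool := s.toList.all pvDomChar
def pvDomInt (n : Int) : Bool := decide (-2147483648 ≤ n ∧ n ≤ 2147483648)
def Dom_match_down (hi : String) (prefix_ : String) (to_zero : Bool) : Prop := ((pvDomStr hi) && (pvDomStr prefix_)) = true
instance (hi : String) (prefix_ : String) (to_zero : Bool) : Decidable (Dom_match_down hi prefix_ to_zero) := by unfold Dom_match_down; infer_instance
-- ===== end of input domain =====

-- B replaces A's per-digit recursion by one explicit left-to-right loop collecting the alternation terms, joined once at the end (objective: alternative/iterative).

-- ===== PORT A =====
-- "[0-9]" * n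
def pvRep09 (n : Nat) : List Char := (List.replicate n ['[', '0', '-', '9', ']']).flatten

-- f"{int(c) - 1}" for a single char c
def pvIntM1 (c : Char) : List Char := PySem.Int.toChars ((PySem.Int.ofChars? [c]).getD 0 - 1)

-- A's recursion over the characters of hi; [] is where Python raises IndexError (excluded by Pre_)
def matchDownGo : Bool → List Char → List Char → List Char
  | _, [], _ => []
  | false, c :: cs, p =>
      let pre := if c = '1' then [c]
                 else ((if '2' < c then '[' :: '1' :: '-' :: (pvIntM1 c ++ [']']) else ['1'])
                       ++ pvRep09 cs.length ++ '|' :: [c])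
      p ++ pre ++ '(' :: (matchDownGo true cs [] ++ [')'])
  | true, [c], p => if c ≠ '0' then p ++ '[' :: '0' :: '-' :: [c, ']'] else p ++ [c]
  | true, c :: c' :: cs, p =>
      if c = '0' then matchDownGo true (c' :: cs) (p ++ [c])
      else
        let range_k := (if c ≠ '1' then '[' :: '0' :: '-' :: (pvIntM1 c ++ [']']) else ['0'])
                       ++ ((c' :: cs).map (fun _ => ['[', '0', '-', '9', ']'])).flatten
        p ++ range_k ++ '|' :: matchDownGo true (c' :: cs) (p ++ [c])

def match_down (hi : String) (prefix_ : String) (to_zero : Bool) : String :=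
  String.mk (matchDownGo to_zero hi.toList prefix_.toList)

-- ===== PORT B =====
-- the loop body's lower-range piece: "0" if d == "1" else "[0-" + chr(ord(d)-1) + "]"
def pvLow (d : Char) : List Char := if d = '1' then ['0'] else '[' :: '0' :: '-' :: (pvIntM1 d ++ [']'])

-- "[0-9]" * rest
def pvRep09B (n : Nat) : List Char := (List.replicate n ['[', '0', '-', '9', ']']).flatten

-- B's single pass: state = (collected terms, running prefix); rest = number of chars after d
def matchDownTerms : List Char → List Char → List (List Char)
  | [], _ => []
  | [d], run => [if d = '0' then run ++ [d] else run ++ '[' :: '0' :: '-' :: [d, ']']]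
  | d :: c' :: cs, run =>
      if d ≠ '0' then (run ++ pvLow d ++ pvRep09B (c' :: cs).length) :: matchDownTerms (c' :: cs) (run ++ [d])
      else matchDownTerms (c' :: cs) (run ++ [d])

def match_down_alt (hi : String) (prefix_ : String) (to_zero : Bool) : String :=
  if to_zero then String.mk (PySem.Chars.join ['|'] (matchDownTerms hi.toList prefix_.toList))
  else
    match hi.toList with
    | [] => ""   -- Python B raises IndexError here (hi[0]); excluded by Pre_
    | c :: cs =>
      let pre := if c = '1' then [c]
                 else ((if '2' < c then '[' :: '1' :: '-' :: (pvIntM1 c ++ [']']) else ['1'])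
                       ++ pvRep09B cs.length ++ '|' :: [c])
      String.mk (prefix_.toList ++ pre ++ '(' :: (PySem.Chars.join ['|'] (matchDownTerms cs []) ++ [')']))

-- ===== PRECONDITION & SPEC =====
-- Pre_ excludes exactly the inputs on which Python A raises: IndexError on too-short hi, and
-- ValueError from int() when a char it is applied to (every char before the last of the scanned
-- part, and a large-enough first char when to_zero is false) is not a digit.
def Pre_match_down (hi : String) (prefix_ : String) (to_zero : Bool) : Prop :=
  if to_zero then hi.toList ≠ [] ∧ hi.toList.dropLast.all (fun c => '0' ≤ c && c ≤ '9') = true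
  else 2 ≤ hi.toList.length ∧ hi.toList.headI ≤ '9' ∧
    hi.toList.tail.dropLast.all (fun c => '0' ≤ c && c ≤ '9') = true
instance (hi : String) (prefix_ : String) (to_zero : Bool) : Decidable (Pre_match_down hi prefix_ to_zero) := by unfold Pre_match_down; infer_instance
def pvWitness_match_down : String × String × Bool := ("20", "", true)

def Spec_match_down (hi : String) (prefix_ : String) (to_zero : Bool) (out : String) : Prop := out = match_down_alt hi prefix_ to_zero
instance (hi : String) (prefix_ : String) (to_zero : Bool) (out : String) : Decidable (Spec_match_down hi prefix_ to_zero out) := by unfold Spec_match_down; infer_instance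

-- ===== CLAIM (what is proved, stated in full; the proofs are below) =====
def Claim_equal_match_down : Prop := ∀ (hi : String) (prefix_ : String) (to_zero : Bool), Dom_match_down hi prefix_ to_zero → Pre_match_down hi prefix_ to_zero → Spec_match_down hi prefix_ to_zero (match_down hi prefix_ to_zero)

-- ===== LEMMAS AND PROOFS =====

theorem matchDownTerms_ne_nil (cs : List Char) (run : List Char) (h : cs ≠ []) :
    matchDownTerms cs run ≠ [] := by
  induction cs generalizing run with
  | nil => exact absurd rfl h
  | cons d t ih =>
    cases t with
    | nil => simp [matchDownTerms]
    | cons c' cs' =>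
      by_cases hd : d = '0' <;> simp [matchDownTerms, hd] <;> exact ih _ (by simp)

theorem join_cons_ne (t : List Char) (l : List (List Char)) (h : l ≠ []) :
    PySem.Chars.join ['|'] (t :: l) = t ++ '|' :: PySem.Chars.join ['|'] l := by
  cases l with
  | nil => exact absurd rfl h
  | cons u l' => simp [PySem.Chars.join_cons_cons]

-- the core equivalence for the to_zero branch
theorem go_eq_terms (cs : List Char) (p : List Char) (hne : cs ≠ [])
    (hdig : ∀ c ∈ cs.dropLast, '0' ≤ c ∧ c ≤ '9') :
    matchDownGo true cs p = PySem.Chars.join ['|'] (matchDownTerms cs p) := by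
  induction cs generalizing p with
  | nil => exact absurd rfl hne
  | cons c t ih =>
    cases t with
    | nil =>
      by_cases hc : c = '0' <;>
        simp [matchDownGo, matchDownTerms, hc, PySem.Chars.join_singleton]
    | cons c' cs' =>
      have hdig' : ∀ x ∈ (c' :: cs').dropLast, '0' ≤ x ∧ x ≤ '9' := by
        intro x hx
        exact hdig x (by simp [List.dropLast_cons_of_ne_nil, hx])
      have hrec := ih (p ++ [c]) (by simp) hdig'
      by_cases hc : c = '0'
      · subst hc
        simp [matchDownGo, matchDownTerms, hrec]
      · have hne' : matchDownTerms (c' :: cs') (p ++ [c]) ≠ [] :=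
          matchDownTerms_ne_nil _ _ (by simp)
        rw [show matchDownTerms (c :: c' :: cs') p
              = (p ++ pvLow c ++ pvRep09B (c' :: cs').length)
                :: matchDownTerms (c' :: cs') (p ++ [c]) from by
            simp [matchDownTerms, hc]]
        rw [join_cons_ne _ _ hne', ← hrec]
        by_cases h1 : c = '1'
        · simp [matchDownGo, h1, pvLow, pvRep09, pvRep09B,
            List.map_const', List.replicate_succ, List.flatten_cons, List.append_assoc]
        · simp [matchDownGo, hc, h1, pvLow, pvRep09, pvRep09B,
            List.map_const', List.replicate_succ, List.flatten_cons, List.append_assoc]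

-- ===== VERDICT (by name: the statement is the Claim_ definition above) =====
theorem match_down_spec : Claim_equal_match_down := by
  intro hi prefix_ to_zero _ hpre
  unfold Spec_match_down match_down match_down_alt
  cases to_zero with
  | true =>
    simp only [if_pos rfl]
    unfold Pre_match_down at hpre
    simp only [if_pos rfl] at hpre
    refine congrArg String.mk (go_eq_terms _ _ hpre.1 ?_)
    intro c hc
    simpa using List.all_eq_true.mp hpre.2 c hc
  | false =>
    unfold Pre_match_down at hpre
    simp only [Bool.false_eq_true, if_false] at hpre ⊢
    cases hcs : hi.toList with
    | nil => rw [hcs] at hpre; simp at hpre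
    | cons c cs =>
      rw [hcs] at hpre
      obtain ⟨hlen, hhead, hdig⟩ := hpre
      have hcsne : cs ≠ [] := by
        intro hx; rw [hx] at hlen; simp at hlen
      have hinner := go_eq_terms cs [] hcsne (by
        intro x hx
        simpa using List.all_eq_true.mp hdig x (by simpa using hx))
      apply congrArg String.mk
      by_cases h1 : c = '1'
      · simp [matchDownGo, h1, hinner]
      · by_cases h2 : '2' < c
        · simp [matchDownGo, h1, h2, hinner, pvRep09, pvRep09B]
        · simp [matchDownGo, h1, h2, hinner, pvRep09, pvRep09B]
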